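-- pv_equiv track=rewrite | github.com/diipperss/FYP_DATA | crawler.py | remove_clickbait_lines
-- ===== SOURCE A (Python) =====
-- def remove_clickbait_lines(text):
--     blacklist_phrases = [
--         "Sponsored", "Advisors:", "click here", "Partner Links", "Advertisement"
--     ]
--     clean_lines = [
--         line for line in text.splitlines()
--         if not any(phrase.lower() in line.lower() for phrase in blacklist_phrases)
--     ]
--     return "\n".join(clean_lines)
-- ===== SOURCE B (Python) =====
-- _PHRASES = ("sponsored", "advisors:", "click here", "partner links", "advertisement")
--
--
-- def _hit(low):
--     # position-major scan: at each start position, try every phrase as a prefix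
--     return any(low.startswith(p, i)
--                for i in range(len(low) + 1)
--                for p in _PHRASES)
--
--
-- def remove_clickbait_lines(text):
--     kept = [line for line in text.splitlines() if not _hit(line.lower())]
--     return "\n".join(kept)
-- ===== Notes on version B (the rewrite author's own statement) =====
-- stated objective: alternative
-- what changed: Replaces the per-phrase Python substring membership test against each lowered line by a position-major naive multi-pattern matcher: one left-to-right scan of each lowered line, testing all five pre-lowered phrases as prefixes at every position.
import Mathlib
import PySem

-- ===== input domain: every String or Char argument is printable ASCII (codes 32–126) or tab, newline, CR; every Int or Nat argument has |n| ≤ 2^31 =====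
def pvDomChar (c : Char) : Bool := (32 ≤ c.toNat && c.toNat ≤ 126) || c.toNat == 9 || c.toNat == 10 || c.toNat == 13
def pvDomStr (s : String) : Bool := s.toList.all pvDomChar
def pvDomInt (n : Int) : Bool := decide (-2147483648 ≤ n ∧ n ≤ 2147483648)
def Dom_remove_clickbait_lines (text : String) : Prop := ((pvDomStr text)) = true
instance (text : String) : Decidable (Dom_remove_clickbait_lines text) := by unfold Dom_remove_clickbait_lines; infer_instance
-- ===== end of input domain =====

-- B replaces the per-phrase substring operator with a position-major prefix scan of each
-- lowered line against the pre-lowered phrases (alternative algorithm, same cost class).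

-- ===== PORT A =====
def remove_clickbait_lines (text : String) : String :=
  let blacklist_phrases : List String :=
    ["Sponsored", "Advisors:", "click here", "Partner Links", "Advertisement"]
  let clean_lines : List String :=
    (PySem.Str.splitlines text).filter (fun line =>
      !(blacklist_phrases.any (fun phrase =>
        PySem.Str.isIn (PySem.Str.lower phrase) (PySem.Str.lower line))))
  PySem.Str.join "\n" clean_lines

-- ===== PORT B =====
def pvPhrases : List String :=
  ["sponsored", "advisors:", "click here", "partner links", "advertisement"]

-- Python's `low.startswith(p, i)` with 0 ≤ i ≤ len(low) is ported exactly as a prefix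
-- test of p against the character list of low dropped at i.
def pvHit (low : String) : Bool :=
  -- len(low) + 1 positions: len(low) is ported as low.toList.length (exact, a Nat for range)
  (List.range (low.toList.length + 1)).any (fun i =>
    pvPhrases.any (fun p => PySem.Chars.startswith (low.toList.drop i) p.toList))

def remove_clickbait_lines_alt (text : String) : String :=
  let kept : List String :=
    (PySem.Str.splitlines text).filter (fun line => !pvHit (PySem.Str.lower line))
  PySem.Str.join "\n" kept

-- ===== PRECONDITION & SPEC =====
def Spec_remove_clickbait_lines (text : String) (out : String) : Prop := out = remove_clickbait_lines_alt text
instance (text : String) (out : String) : Decidable (Spec_remove_clickbait_lines text out) := by unfold Spec_remove_clickbait_lines; infer_instance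

-- ===== CLAIM (what is proved, stated in full; the proofs are below) =====
def Claim_equal_remove_clickbait_lines : Prop := ∀ (text : String), Dom_remove_clickbait_lines text → Spec_remove_clickbait_lines text (remove_clickbait_lines text)

-- ===== LEMMAS AND PROOFS =====

-- the position-major prefix scan over one pattern list equals the per-pattern substring test
lemma pv_scan_any_eq (plist : List String) (s : List Char) :
    (List.range (s.length + 1)).any (fun i =>
      plist.any (fun p => PySem.Chars.startswith (s.drop i) p.toList))
    = plist.any (fun p => PySem.Chars.isIn p.toList s) := by
  rw [Bool.eq_iff_iff]
  simp only [List.any_eq_true, List.mem_range, PySem.Chars.startswith_iff]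
  constructor
  · rintro ⟨i, _, p, hp, hpre⟩
    exact ⟨p, hp, (PySem.Chars.exists_prefix_drop_iff_isIn _ _).mp ⟨i, hpre⟩⟩
  · rintro ⟨p, hp, hin⟩
    obtain ⟨j, hpre⟩ := (PySem.Chars.exists_prefix_drop_iff_isIn _ _).mpr hin
    refine ⟨min j s.length, by omega, p, hp, ?_⟩
    by_cases h : j ≤ s.length
    · simpa [min_eq_left h] using hpre
    · have hnil : s.drop j = [] := List.drop_eq_nil_of_le (by omega)
      rw [hnil] at hpre
      simp only [min_eq_right (by omega : s.length ≤ j), List.drop_length]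
      exact hpre

lemma pv_pred_eq (line : String) :
    (!(["Sponsored", "Advisors:", "click here", "Partner Links", "Advertisement"].any
        (fun phrase => PySem.Str.isIn (PySem.Str.lower phrase) (PySem.Str.lower line))))
    = !pvHit (PySem.Str.lower line) := by
  congr 1
  unfold pvHit
  rw [pv_scan_any_eq]
  have h1 : PySem.Str.lower "Sponsored" = "sponsored" := by decide
  have h2 : PySem.Str.lower "Advisors:" = "advisors:" := by decide
  have h3 : PySem.Str.lower "click here" = "click here" := by decide
  have h4 : PySem.Str.lower "Partner Links" = "partner links" := by decide
  have h5 : PySem.Str.lower "Advertisement" = "advertisement" := by decide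
  simp only [pvPhrases, List.any_cons, List.any_nil, PySem.Str.isIn_eq, h1, h2, h3, h4, h5]

theorem pv_main (text : String) :
    remove_clickbait_lines text = remove_clickbait_lines_alt text := by
  simp only [remove_clickbait_lines, remove_clickbait_lines_alt]
  exact congrArg (PySem.Str.join "\n") (List.filter_congr (fun line _ => pv_pred_eq line))

-- ===== VERDICT (by name: the statement is the Claim_ definition above) =====
theorem remove_clickbait_lines_spec : Claim_equal_remove_clickbait_lines := by
  intro text _
  exact pv_main text
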